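-- pv_equiv track=rewrite | github.com/jakuta-tech/forbidden | src/stresser/stresser.py | get_directories
-- ===== SOURCE A (Python) =====
-- def unique(sequence):
-- 	seen = set()
-- 	return [x for x in sequence if not (x in seen or seen.add(x))]
--
-- def get_directories(path = None):
-- 	const = "/"
-- 	tmp = ["", const]
-- 	if path:
-- 		dir_empty = ""
-- 		dir_const = const
-- 		array = path.split(const)
-- 		for entry in array:
-- 			if entry:
-- 				dir_empty += const + entry
-- 				dir_const += entry + const
-- 				tmp.extend([dir_empty, dir_const])
-- 	return unique(tmp)
-- ===== SOURCE B (Python) =====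
-- def get_directories(path = None):
-- 	parts = [p for p in path.split("/") if p] if path else []
-- 	if not parts:
-- 		return ["", "/"]
-- 	full = "/" + "/".join(parts)
-- 	out = ["", "/"]
-- 	for i in range(1, len(full)):
-- 		if full[i] == "/":
-- 			out += [full[:i], full[:i] + "/"]
-- 	out += [full, full + "/"]
-- 	return out
-- ===== Notes on version B (the rewrite author's own statement) =====
-- stated objective: alternative
-- what changed: B normalizes the path once into full = '/' + '/'.join(parts) and then scans that single string's character positions, emitting the slice full[:i] (and full[:i]+'/') at each interior '/' and the full string last - instead of A's three running string accumulators per component and its set-based dedup pass (prefixes of full strictly grow, so duplicates cannot arise).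
import Mathlib
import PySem

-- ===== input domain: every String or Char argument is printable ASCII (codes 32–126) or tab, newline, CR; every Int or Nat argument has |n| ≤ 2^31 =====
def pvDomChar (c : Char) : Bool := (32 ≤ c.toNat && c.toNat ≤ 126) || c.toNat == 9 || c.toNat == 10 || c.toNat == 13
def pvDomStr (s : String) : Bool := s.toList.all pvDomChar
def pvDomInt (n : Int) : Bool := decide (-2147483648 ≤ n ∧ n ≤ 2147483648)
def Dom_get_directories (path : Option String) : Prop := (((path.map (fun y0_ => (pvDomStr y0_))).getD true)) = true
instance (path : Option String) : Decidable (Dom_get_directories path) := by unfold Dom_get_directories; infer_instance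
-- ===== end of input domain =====

-- B normalizes the path once into full = '/' + '/'.join(parts) and then scans that single
-- string's character positions, slicing it at each interior '/' — no running accumulators
-- and no set-based dedup (objective: alternative).

-- ===== PORT A =====
-- helper 'unique' of A: list comprehension with a mutated 'seen' set, as structural recursion
def uniqueAux (seen : PySem.Set String) : List String → List String
  | [] => []
  | x :: xs =>
    if PySem.Set.contains seen x then uniqueAux seen xs
    else x :: uniqueAux (PySem.Set.add seen x) xs

def pyUnique (sequence : List String) : List String :=
  uniqueAux PySem.Set.empty sequence

def get_directories (path : Option String) : List String :=
  let const := "/"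
  let tmp : List String := ["", const]
  let tmp :=
    match path with
    | none => tmp                  -- 'if path:' false for None
    | some p =>
      if p = "" then tmp           -- 'if path:' false for ""
      else
        let array := (PySem.Str.split? p const).getD []  -- sep = "/" ≠ "", so split? is `some`
        (array.foldl (fun (st : String × String × List String) entry =>
            if entry ≠ "" then
              let de := st.1 ++ (const ++ entry)
              let dc := st.2.1 ++ (entry ++ const)
              (de, dc, st.2.2 ++ [de, dc])
            else st) ("", const, tmp)).2.2
  pyUnique tmp

-- ===== PORT B =====
def get_directories_alt (path : Option String) : List String :=
  let parts : List String :=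
    match path with
    | none => []                   -- 'if path' false for None
    | some p =>
      if p = "" then []            -- 'if path' false for ""
      else ((PySem.Str.split? p "/").getD []).filter (fun q => q ≠ "")
  if parts = [] then ["", "/"]
  else
    let full := "/" ++ PySem.Str.join "/" parts
    ((PySem.List.pyRange 1 (PySem.Str.len full) 1).foldl
      (fun out i =>
        if PySem.Str.pyGet? full i = some '/' then
          out ++ [PySem.Str.slice full none (some i), PySem.Str.slice full none (some i) ++ "/"]
        else out) ["", "/"]) ++ [full, full ++ "/"]

-- ===== PRECONDITION & SPEC =====
def Spec_get_directories (path : Option String) (out : List String) : Prop := out = get_directories_alt path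
instance (path : Option String) (out : List String) : Decidable (Spec_get_directories path out) := by unfold Spec_get_directories; infer_instance

-- ===== CLAIM (what is proved, stated in full; the proofs are below) =====
def Claim_equal_get_directories : Prop := ∀ (path : Option String), Dom_get_directories path → Spec_get_directories path (get_directories path)

-- ===== LEMMAS AND PROOFS =====

theorem str_ext {s t : String} (h : s.toList = t.toList) : s = t := by
  have := congrArg String.ofList h; simpa using this

theorem str_length_pos {s : String} (h : s ≠ "") : 0 < s.length := by
  rw [← String.length_toList]
  refine List.length_pos_iff.mpr ?_
  intro hc
  exact h (by have := congrArg String.ofList hc; simpa using this)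

theorem join_singleton' (a : String) : PySem.Str.join "/" [a] = a := by
  apply str_ext; simp [PySem.Str.toList_join, PySem.Chars.join_singleton]

theorem join_cons' (a b : String) (l : List String) :
    PySem.Str.join "/" (a :: b :: l) = a ++ "/" ++ PySem.Str.join "/" (b :: l) := by
  apply str_ext; simp [PySem.Str.toList_join, PySem.Chars.join_cons_cons]

-- the list of cumulative prefixes, with accumulator e (no trailing slash)
def scan (e : String) : List String → List String
  | [] => []
  | x :: xs => (e ++ "/" ++ x) :: scan (e ++ "/" ++ x) xs

-- the interleaved prefix/prefix-with-slash list A's loop appends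
def chain (e : String) : List String → List String
  | [] => []
  | x :: xs => (e ++ ("/" ++ x)) :: ((e ++ "/") ++ (x ++ "/")) :: chain (e ++ ("/" ++ x)) xs

theorem chain_eq_flatMap (xs : List String) : ∀ (e : String),
    chain e xs = (scan e xs).flatMap (fun p => [p, p ++ "/"]) := by
  induction xs with
  | nil => intro e; rfl
  | cons x xs ih =>
    intro e
    simp only [chain, scan, List.flatMap_cons, ← ih]
    simp [String.append_assoc]

-- A's loop over the (filtered) entries appends exactly `chain e`
theorem loopA (xs : List String) : ∀ (e : String) (tmp : List String),
    (xs.foldl (fun (st : String × String × List String) entry =>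
        (st.1 ++ ("/" ++ entry), st.2.1 ++ (entry ++ "/"),
          st.2.2 ++ [st.1 ++ ("/" ++ entry), st.2.1 ++ (entry ++ "/")])) (e, e ++ "/", tmp)).2.2
      = tmp ++ chain e xs := by
  induction xs with
  | nil => intro e tmp; simp [chain]
  | cons x xs ih =>
    intro e tmp
    simp only [List.foldl_cons]
    have hc : (e ++ "/") ++ (x ++ "/") = (e ++ ("/" ++ x)) ++ "/" := by
      simp [String.append_assoc]
    rw [hc, ih (e ++ ("/" ++ x)) (tmp ++ [e ++ ("/" ++ x), (e ++ ("/" ++ x)) ++ "/"])]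
    simp [chain, hc]

-- lengths along `chain e xs` strictly increase (entries are nonempty)
theorem chain_lengths (xs : List String) : ∀ (e : String), (∀ x ∈ xs, x ≠ "") →
    List.Pairwise (fun a b : String => a.length < b.length) (chain e xs) ∧
    ∀ s ∈ chain e xs, e.length + 2 ≤ s.length := by
  induction xs with
  | nil => intro e _; exact ⟨List.Pairwise.nil, by simp [chain]⟩
  | cons x xs ih =>
    intro e hne
    have hx : 0 < x.length := str_length_pos (hne x (by simp))
    obtain ⟨ihp, ihlen⟩ := ih (e ++ ("/" ++ x)) (fun y hy => hne y (by simp [hy]))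
    have h1 : ("/" : String).length = 1 := rfl
    have hlen_a : (e ++ ("/" ++ x)).length = e.length + 1 + x.length := by
      rw [String.length_append, String.length_append, h1]; omega
    have hlen_b : ((e ++ "/") ++ (x ++ "/")).length = e.length + x.length + 2 := by
      rw [String.length_append, String.length_append, String.length_append, h1]; omega
    constructor
    · refine List.Pairwise.cons ?_ (List.Pairwise.cons ?_ ihp)
      · intro s hs
        rcases List.mem_cons.mp hs with h | hs
        · subst h; omega
        · have := ihlen s hs; omega
      · intro s hs; have := ihlen s hs; omega
    · intro s hs
      rcases List.mem_cons.mp hs with h | hs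
      · subst h; omega
      rcases List.mem_cons.mp hs with h | hs
      · subst h; omega
      · have := ihlen s hs; omega

-- A's `unique` is the identity on a list with no duplicates
theorem uniqueAux_id (l : List String) : ∀ (seen : PySem.Set String),
    (∀ x ∈ l, x ∉ seen) → l.Nodup → uniqueAux seen l = l := by
  induction l with
  | nil => intro seen _ _; rfl
  | cons x xs ih =>
    intro seen hseen hnd
    have hx : PySem.Set.contains seen x = false := by
      rcases Bool.eq_false_or_eq_true (PySem.Set.contains seen x) with h | h
      · exact absurd ((PySem.Set.contains_iff seen x).mp h) (hseen x (by simp))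
      · exact h
    simp only [uniqueAux, hx]
    simp only [Bool.false_eq_true, if_false]
    refine congrArg (x :: ·) (ih (PySem.Set.add seen x) ?_ hnd.of_cons)
    intro y hy hmem
    rcases (PySem.Set.mem_add seen x y).mp hmem with h | h
    · exact hseen y (by simp [hy]) h
    · subst h; exact (List.nodup_cons.mp hnd).1 hy

-- B's prefix comprehension characterised as `scan`
theorem prefixes_eq (xs : List String) : ∀ (e : String),
    (List.range xs.length).map (fun k => e ++ "/" ++ PySem.Str.join "/" (xs.take (k + 1)))
      = scan e xs := by
  induction xs with
  | nil => intro e; simp [scan]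
  | cons x xs ih =>
    intro e
    rw [List.length_cons, List.range_succ_eq_map, List.map_cons, List.map_map]
    have hhead : e ++ "/" ++ PySem.Str.join "/" ((x :: xs).take (0 + 1)) = e ++ "/" ++ x := by
      simp [join_singleton']
    have htail : (List.range xs.length).map
        ((fun k => e ++ "/" ++ PySem.Str.join "/" ((x :: xs).take (k + 1))) ∘ Nat.succ)
        = (List.range xs.length).map
            (fun k => (e ++ "/" ++ x) ++ "/" ++ PySem.Str.join "/" (xs.take (k + 1))) := by
      refine List.map_congr_left ?_
      intro k hk
      have hk' : k < xs.length := List.mem_range.mp hk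
      have htk : ∃ y ys, xs.take (k + 1) = y :: ys := by
        cases xs with
        | nil => simp at hk'
        | cons y ys => exact ⟨y, ys.take k, by simp⟩
      obtain ⟨y, ys, hys⟩ := htk
      simp only [Function.comp_apply, List.take_succ_cons, hys, join_cons']
      simp [String.append_assoc]
    rw [hhead, htail, ih (e ++ "/" ++ x)]
    rfl

-- no piece produced by str.split('/') contains '/', proved on the fuelled worker
theorem go_noslash : ∀ (fuel : Nat), ∀ (l cur : List Char) (acc : List (List Char)),
    l.length < fuel → (∀ p ∈ acc, '/' ∉ p) → ('/' ∉ cur) →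
    ∀ p ∈ PySem.Chars.splitOn.go ['/'] fuel l cur acc, '/' ∉ p := by
  intro fuel
  induction fuel with
  | zero => intro l cur acc hlt; omega
  | succ fuel ih =>
    intro l cur acc hlt hacc hcur
    cases l with
    | nil =>
      rw [PySem.Chars.splitOn.go.eq_def]
      intro p hp
      rw [List.mem_reverse] at hp
      rcases List.mem_cons.mp hp with h | h
      · subst h; simpa [List.mem_reverse] using hcur
      · exact hacc p h
    | cons c rest =>
      rw [PySem.Chars.splitOn.go.eq_def]
      by_cases hc : c = '/'
      · subst hc
        have hpre : (['/'] : List Char).isPrefixOf ('/' :: rest) = true := by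
          simp [List.isPrefixOf]
        simp only [hpre]
        refine ih _ [] (cur.reverse :: acc) ?_ ?_ (by simp)
        · simp at hlt ⊢; omega
        · intro p hp
          rcases List.mem_cons.mp hp with h | h
          · subst h; simpa [List.mem_reverse] using hcur
          · exact hacc p h
      · have hpre : (['/'] : List Char).isPrefixOf (c :: rest) = false := by
          simp [List.isPrefixOf]
          exact fun h => hc h.symm
        simp only [hpre]
        simp only [Bool.false_eq_true, if_false]
        refine ih rest (c :: cur) acc ?_ hacc ?_
        · simp at hlt ⊢; omega
        · intro hmem
          rcases List.mem_cons.mp hmem with h | h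
          · exact hc h.symm
          · exact hcur h

theorem split_noslash (p : String) :
    ∀ x ∈ (PySem.Str.split? p "/").getD [], '/' ∉ x.toList := by
  intro x hx
  have hsp : PySem.Str.split? p "/"
      = some ((PySem.Chars.splitOn p.toList ['/']).map String.ofList) := by
    simp [PySem.Str.split?, PySem.Chars.split?]
  rw [hsp] at hx
  simp only [Option.getD_some, List.mem_map] at hx
  obtain ⟨cs, hcs, rfl⟩ := hx
  have := go_noslash (p.toList.length + 1) p.toList [] [] (by omega) (by simp) (by simp)
    cs hcs
  simpa using this

-- the cut list: every proper prefix of L ending just before an interior '/'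
def cutsL (L : List Char) : List (List Char) :=
  ((List.range L.length).filter
      (fun k => decide (L[k]? = some '/') && decide (0 < k))).map (fun k => L.take k)

theorem cutsL_cons_nosl (y : List Char) (hy : '/' ∉ y) : cutsL ('/' :: y) = [] := by
  unfold cutsL
  rw [List.map_eq_nil_iff, List.filter_eq_nil_iff]
  intro k hk
  cases k with
  | zero => simp
  | succ j =>
    simp only [List.getElem?_cons_succ, Bool.and_eq_true, decide_eq_true_eq, not_and]
    intro hj _
    exact hy (List.mem_of_getElem? hj)

theorem cutsL_append (P y : List Char) (hP : 0 < P.length) (hy : '/' ∉ y) :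
    cutsL (P ++ '/' :: y) = cutsL P ++ [P] := by
  unfold cutsL
  have hlen : (P ++ '/' :: y).length = P.length + (y.length + 1) := by
    simp [List.length_append]
  rw [hlen, List.range_add, List.range_succ_eq_map, List.map_cons, List.map_map,
    List.filter_append, List.filter_cons, List.map_append]
  have hmid : (decide ((P ++ '/' :: y)[P.length + 0]? = some '/') && decide (0 < P.length + 0))
      = true := by
    simp; omega
  rw [hmid, if_pos rfl]
  have htailnil : ((List.range y.length).map ((fun x => P.length + x) ∘ Nat.succ)).filter
      (fun k => decide ((P ++ '/' :: y)[k]? = some '/') && decide (0 < k)) = [] := by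
    rw [List.filter_eq_nil_iff]
    intro k hk
    obtain ⟨j, hj, rfl⟩ := List.mem_map.mp hk
    have hjlt : j < y.length := List.mem_range.mp hj
    have : (P ++ '/' :: y)[((fun x => P.length + x) ∘ Nat.succ) j]? = y[j]? := by
      simp only [Function.comp_apply]
      rw [List.getElem?_append_right (by omega)]
      simp only [Nat.add_sub_cancel_left]
      simp [Nat.succ_eq_add_one]
    simp only [this, Bool.and_eq_true, decide_eq_true_eq, not_and]
    intro hget _
    exact hy (List.mem_of_getElem? hget)
  rw [htailnil]
  have hleft : ((List.range P.length).filter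
      (fun k => decide ((P ++ '/' :: y)[k]? = some '/') && decide (0 < k)))
      = ((List.range P.length).filter
        (fun k => decide (P[k]? = some '/') && decide (0 < k))) := by
    refine List.filter_congr ?_
    intro k hk
    have hklt : k < P.length := List.mem_range.mp hk
    rw [List.getElem?_append_left hklt]
  rw [hleft]
  have hmapleft : ((List.range P.length).filter
        (fun k => decide (P[k]? = some '/') && decide (0 < k))).map
        (fun k => (P ++ '/' :: y).take k)
      = ((List.range P.length).filter
        (fun k => decide (P[k]? = some '/') && decide (0 < k))).map (fun k => P.take k) := by
    refine List.map_congr_left ?_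
    intro k hk
    have hklt : k < P.length := List.mem_range.mp (List.mem_of_mem_filter hk)
    exact List.take_append_of_le_length (by omega)
  rw [hmapleft]
  simp

-- interior '/'-positions of '/' + '/'.join(parts) cut it exactly at the proper prefixes
theorem joinC_append_singleton (xs : List (List Char)) (hxs : xs ≠ []) (y : List Char) :
    PySem.Chars.join ['/'] (xs ++ [y]) = PySem.Chars.join ['/'] xs ++ '/' :: y := by
  induction xs with
  | nil => exact absurd rfl hxs
  | cons x xs ih =>
    cases xs with
    | nil => simp [PySem.Chars.join_cons_cons, PySem.Chars.join_singleton]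
    | cons b l =>
      simp only [List.cons_append] at ih ⊢
      rw [PySem.Chars.join_cons_cons, ih (by simp), PySem.Chars.join_cons_cons]
      simp

theorem charMain (ps : List (List Char)) (hne : ps ≠ [])
    (h : ∀ x ∈ ps, x ≠ [] ∧ '/' ∉ x) :
    cutsL ('/' :: PySem.Chars.join ['/'] ps) ++ ['/' :: PySem.Chars.join ['/'] ps]
      = (List.range ps.length).map (fun k => '/' :: PySem.Chars.join ['/'] (ps.take (k + 1))) := by
  induction ps using List.reverseRecOn with
  | nil => exact absurd rfl hne
  | append_singleton xs y ih =>
    by_cases hxs : xs = []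
    · subst hxs
      simp only [List.nil_append]
      rw [PySem.Chars.join_singleton, cutsL_cons_nosl y (h y (by simp)).2]
      simp [PySem.Chars.join_singleton]
    · have hJ : PySem.Chars.join ['/'] (xs ++ [y])
          = PySem.Chars.join ['/'] xs ++ '/' :: y := joinC_append_singleton xs hxs y
      have hsplit : ('/' :: PySem.Chars.join ['/'] (xs ++ [y]))
          = ('/' :: PySem.Chars.join ['/'] xs) ++ '/' :: y := by
        rw [hJ]; simp
      rw [hsplit, cutsL_append _ y (by simp) (h y (by simp)).2]
      have ihh := ih hxs (fun x hx => h x (by simp [hx]))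
      rw [List.length_append, List.length_singleton, List.range_succ, List.map_append]
      have hlast : [xs.length].map
          (fun k => '/' :: PySem.Chars.join ['/'] ((xs ++ [y]).take (k + 1)))
          = [('/' :: PySem.Chars.join ['/'] xs) ++ '/' :: y] := by
        have : (xs ++ [y]).take (xs.length + 1) = xs ++ [y] := by
          apply List.take_of_length_le; simp
        simp [this, hJ]
      have hinit : (List.range xs.length).map
          (fun k => '/' :: PySem.Chars.join ['/'] ((xs ++ [y]).take (k + 1)))
          = (List.range xs.length).map
            (fun k => '/' :: PySem.Chars.join ['/'] (xs.take (k + 1))) := by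
        refine List.map_congr_left ?_
        intro k hk
        have : (xs ++ [y]).take (k + 1) = xs.take (k + 1) :=
          List.take_append_of_le_length (by have := List.mem_range.mp hk; omega)
        rw [this]
      rw [hlast, hinit, ← ihh]

-- the string-level cut list produced by B's scan of `full`
theorem cuts_scan (parts : List String) (hne : parts ≠ [])
    (h : ∀ x ∈ parts, x ≠ "" ∧ '/' ∉ x.toList) :
    ((PySem.List.pyRange 1 (PySem.Str.len ("/" ++ PySem.Str.join "/" parts)) 1).filter
        (fun i => decide (PySem.Str.pyGet? ("/" ++ PySem.Str.join "/" parts) i = some '/'))).map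
        (fun i => PySem.Str.slice ("/" ++ PySem.Str.join "/" parts) none (some i))
      ++ ["/" ++ PySem.Str.join "/" parts]
      = scan "" parts := by
  set full := "/" ++ PySem.Str.join "/" parts with hfull
  have hfl : full.toList = '/' :: PySem.Chars.join ['/'] (parts.map String.toList) := by
    rw [hfull]
    simp [PySem.Str.toList_join]
  -- bridge: the pyRange filter/map over `full` is `cutsL full.toList` mapped back to strings
  have hbridge : ((PySem.List.pyRange 1 (PySem.Str.len full) 1).filter
        (fun i => decide (PySem.Str.pyGet? full i = some '/'))).map
        (fun i => PySem.Str.slice full none (some i))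
      = (cutsL full.toList).map String.ofList := by
    have hlen : PySem.Str.len full = (full.toList.length : Int) := by
      simp [PySem.Str.len_eq]
    rw [hlen, PySem.List.pyRange_one]
    have hnt : (((full.toList.length : Int)) - 1).toNat = full.toList.length - 1 := by omega
    rw [hnt, List.filter_map, List.map_map]
    unfold cutsL
    -- peel index 0 off the range on the right
    have hpos : 0 < full.toList.length := by rw [hfl]; simp
    have hrange : List.range full.toList.length
        = 0 :: (List.range (full.toList.length - 1)).map Nat.succ := by
      obtain ⟨m, hm⟩ : ∃ m, full.toList.length = m + 1 := ⟨full.toList.length - 1, by omega⟩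
      rw [hm, List.range_succ_eq_map]
      simp
    rw [hrange, List.filter_cons, List.filter_map, List.map_map]
    have h0 : (decide (full.toList[0]? = some '/') && decide (0 < 0)) = false := by simp
    rw [h0]
    simp only [Bool.false_eq_true, if_false]
    have hfeq : ((fun k => decide (full.toList[k]? = some '/') && decide (0 < k)) ∘ Nat.succ)
        = ((fun i => decide (PySem.Str.pyGet? full i = some '/')) ∘ fun (k : Nat) => (1 : Int) + (k : Int)) := by
      funext k
      simp only [Function.comp_apply]
      have hcast : (1 : Int) + (k : Int) = ((k + 1 : Nat) : Int) := by push_cast; ring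
      rw [hcast, PySem.Str.pyGet?_natCast]
      simp [Nat.succ_eq_add_one]
    rw [hfeq, List.map_map]
    refine List.map_congr_left ?_
    intro k hk
    have hkmem : k ∈ List.range (full.toList.length - 1) :=
      List.mem_of_mem_filter hk
    simp only [Function.comp_apply]
    apply str_ext
    rw [PySem.Str.toList_slice]
    have hcast : (1 : Int) + (k : Int) = ((k + 1 : Nat) : Int) := by push_cast; ring
    simp only [PySem.Chars.slice_eq_listSlice, hcast]
    rw [PySem.List.slice_to_natCast]
    simp [Nat.succ_eq_add_one]
  rw [hbridge]
  -- apply the char-level characterisation and come back to strings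
  have hps : ∀ x ∈ parts.map String.toList, x ≠ [] ∧ '/' ∉ x := by
    intro x hx
    obtain ⟨s, hs, rfl⟩ := List.mem_map.mp hx
    refine ⟨?_, (h s hs).2⟩
    intro hnil
    exact (h s hs).1 (by apply str_ext; simpa using hnil)
  have hchar := charMain (parts.map String.toList) (by simpa using hne) hps
  rw [hfl, ← prefixes_eq parts ""]
  have : (cutsL ('/' :: PySem.Chars.join ['/'] (parts.map String.toList))).map String.ofList
        ++ [full]
      = ((cutsL ('/' :: PySem.Chars.join ['/'] (parts.map String.toList)))
          ++ ['/' :: PySem.Chars.join ['/'] (parts.map String.toList)]).map String.ofList := by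
    rw [List.map_append]
    congr 1
    simp only [List.map_cons, List.map_nil]  -- wait, map over singleton list
    congr 1
    apply str_ext
    rw [← hfl]
    simp
  rw [this, hchar, List.map_map, List.length_map]
  refine List.map_congr_left ?_
  intro k hk
  simp only [Function.comp_apply]
  apply str_ext
  simp [PySem.Str.toList_join, List.map_take]

-- A reduced to `chain`: uniqueness makes `unique` the identity (strict length growth)
theorem aside (parts : List String) (hne : ∀ x ∈ parts, x ≠ "") :
    pyUnique (["", "/"] ++ chain "" parts) = ["", "/"] ++ chain "" parts := by
  obtain ⟨hpw, hlb⟩ := chain_lengths parts "" hne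
  have hpwfull : List.Pairwise (fun a b : String => a.length < b.length)
      (["", "/"] ++ chain "" parts) := by
    refine List.Pairwise.cons ?_ (List.Pairwise.cons ?_ hpw)
    · intro s hs
      rcases List.mem_cons.mp hs with h | hs
      · subst h; decide
      · have := hlb s hs
        have h0 : ("" : String).length = 0 := rfl
        omega
    · intro s hs
      have := hlb s hs
      have h1 : ("/" : String).length = 1 := rfl
      omega
  have hnd : (["", "/"] ++ chain "" parts).Nodup :=
    List.Pairwise.imp (fun h => by intro he; subst he; omega) hpwfull
  exact uniqueAux_id _ PySem.Set.empty (by intro x _ hx; simp [PySem.Set.empty] at hx) hnd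

-- B reduced to `chain` on nonempty part lists
theorem bside (parts : List String) (hne : parts ≠ [])
    (h : ∀ x ∈ parts, x ≠ "" ∧ '/' ∉ x.toList) :
    ((PySem.List.pyRange 1 (PySem.Str.len ("/" ++ PySem.Str.join "/" parts)) 1).foldl
      (fun out i =>
        if PySem.Str.pyGet? ("/" ++ PySem.Str.join "/" parts) i = some '/' then
          out ++ [PySem.Str.slice ("/" ++ PySem.Str.join "/" parts) none (some i),
                  PySem.Str.slice ("/" ++ PySem.Str.join "/" parts) none (some i) ++ "/"]
        else out) ["", "/"])
      ++ ["/" ++ PySem.Str.join "/" parts, ("/" ++ PySem.Str.join "/" parts) ++ "/"]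
    = ["", "/"] ++ chain "" parts := by
  set full := "/" ++ PySem.Str.join "/" parts with hfull
  rw [PySem.List.foldl_ite_eq_foldl_filter
      (fun i => PySem.Str.pyGet? full i = some '/')
      (fun out i => out ++ [PySem.Str.slice full none (some i),
                            PySem.Str.slice full none (some i) ++ "/"]),
    PySem.List.foldl_append_eq_flatMap]
  rw [List.append_assoc]
  congr 1
  have hfm : ((PySem.List.pyRange 1 (PySem.Str.len full) 1).filter
        (fun i => decide (PySem.Str.pyGet? full i = some '/'))).flatMap
        (fun i => [PySem.Str.slice full none (some i),
                   PySem.Str.slice full none (some i) ++ "/"])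
      = (((PySem.List.pyRange 1 (PySem.Str.len full) 1).filter
          (fun i => decide (PySem.Str.pyGet? full i = some '/'))).map
          (fun i => PySem.Str.slice full none (some i))).flatMap
          (fun p => [p, p ++ "/"]) := by
    rw [List.flatMap_map]
  rw [hfm]
  have hpair : (∀ (l : List String),
      (l ++ [full]).flatMap (fun p => [p, p ++ "/"])
        = l.flatMap (fun p => [p, p ++ "/"]) ++ [full, full ++ "/"]) := by
    intro l; simp
  rw [← hpair, cuts_scan parts hne h, chain_eq_flatMap]

-- ===== VERDICT (by name: the statement is the Claim_ definition above) =====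
theorem get_directories_spec : Claim_equal_get_directories := by
  intro path _
  unfold Spec_get_directories get_directories get_directories_alt
  cases path with
  | none => decide
  | some p =>
    by_cases hp : p = ""
    · subst hp; decide
    · simp only [if_neg hp]
      have hfold := PySem.List.foldl_ite_eq_foldl_filter (fun (entry : String) => entry ≠ "")
        (fun (st : String × String × List String) entry =>
          (st.1 ++ ("/" ++ entry), st.2.1 ++ (entry ++ "/"),
            st.2.2 ++ [st.1 ++ ("/" ++ entry), st.2.1 ++ (entry ++ "/")]))
        ((PySem.Str.split? p "/").getD [])
        (("" : String), ("/" : String), (["", "/"] : List String))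
      simp only [hfold]
      have hinit : (("" : String), ("/" : String), (["", "/"] : List String))
          = (("" : String), "" ++ "/", (["", "/"] : List String)) := by
        simp
      rw [hinit, loopA]
      have hprop : ∀ x ∈ ((PySem.Str.split? p "/").getD []).filter
          (fun x => decide (x ≠ "")), x ≠ "" ∧ '/' ∉ x.toList := by
        intro x hx
        refine ⟨by simpa using List.of_mem_filter hx, ?_⟩
        exact split_noslash p x (List.mem_of_mem_filter hx)
      split
      next hnil =>
        rw [hnil, aside [] (by simp)]
        simp [chain]
      next hnil =>
        rw [aside _ (fun x hx => (hprop x hx).1)]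
        exact (bside _ hnil hprop).symm
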